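-- pv_equiv track=rewrite | github.com/nitram31/PTUT | charge.py | wagdalena
-- ===== SOURCE A (Python) =====
-- def wagdalena(seq):
--     """takes an amino acid string and gives the cumulative charge"""
--     dico = {"A": 0, "G": 0, "V": 0, "L": 0, "M": 0, "I": 0, "S": 0, "T": 0, "C": 0, "P": 0, "Q": 0, "F": 0, "Y": 0,
--             "W": 0,
--             "N": 0, "K": 1, "H": 1, "R": 1, "E": -1, "D": -1}
--     res = 0
--     if seq != None:
--         for aa in seq:
--             if aa in dico.keys():
--                 res += dico[aa]
--     else:
--         res = ""
--     return res
-- ===== SOURCE B (Python) =====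
-- def wagdalena(seq):
--     """takes an amino acid string and gives the cumulative charge"""
--     if seq is None:
--         return ""
--     return (seq.count("K") + seq.count("H") + seq.count("R")
--             - seq.count("E") - seq.count("D"))
-- ===== Notes on version B (the rewrite author's own statement) =====
-- stated objective: faster
-- what changed: Replaces the per-character loop over a 20-entry charge dictionary with five whole-string .count scans (positive residues K/H/R minus negative residues E/D, None handled up front); .count runs at C speed, removing the Python-level per-character dict lookups.
-- outside the precondition, e.g. on wagdalena(None): A returns '', B returns ''
import Mathlib
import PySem

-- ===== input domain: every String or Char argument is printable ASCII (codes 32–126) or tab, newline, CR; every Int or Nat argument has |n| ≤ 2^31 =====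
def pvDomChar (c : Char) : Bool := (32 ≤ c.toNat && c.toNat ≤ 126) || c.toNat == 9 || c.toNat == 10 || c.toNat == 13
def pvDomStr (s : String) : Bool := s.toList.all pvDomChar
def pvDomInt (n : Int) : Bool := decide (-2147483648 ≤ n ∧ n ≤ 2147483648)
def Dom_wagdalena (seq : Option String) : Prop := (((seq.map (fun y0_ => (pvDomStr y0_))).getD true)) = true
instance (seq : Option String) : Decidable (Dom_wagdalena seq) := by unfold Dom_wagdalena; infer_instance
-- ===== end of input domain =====

-- B replaces A's per-character dictionary-lookup loop by five whole-string .count scans (measured faster at large sizes in a timing run).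


-- ===== PORT A =====
-- A's charge dictionary (literal, insertion order kept)
def pvDico : PySem.Dict Char Int := PySem.Dict.mk
  [('A',0),('G',0),('V',0),('L',0),('M',0),('I',0),('S',0),('T',0),('C',0),('P',0),
   ('Q',0),('F',0),('Y',0),('W',0),('N',0),('K',1),('H',1),('R',1),('E',-1),('D',-1)]

def wagdalena (seq : Option String) : Int :=
  match seq with
  | some s =>
      s.toList.foldl (fun res aa =>
        if pvDico.contains aa then res + (pvDico.get? aa).getD 0 else res) 0
  | none => 0   -- Python A returns "" here (not an Int); excluded by Pre_wagdalena

-- ===== PORT B =====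
def wagdalena_alt (seq : Option String) : Int :=
  match seq with
  | none => 0   -- Python B returns "" here (not an Int); excluded by Pre_wagdalena
  | some s =>
      (PySem.Str.count s "K" : Int) + PySem.Str.count s "H" + PySem.Str.count s "R"
        - PySem.Str.count s "E" - PySem.Str.count s "D"

-- ===== PRECONDITION & SPEC =====
-- Pre_ excludes only seq = None, where A (and B) return the string "" instead of an int.
def Pre_wagdalena (seq : Option String) : Prop := seq ≠ none
instance (seq : Option String) : Decidable (Pre_wagdalena seq) := by unfold Pre_wagdalena; infer_instance
def pvWitness_wagdalena : Option String := some "KADE"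

def Spec_wagdalena (seq : Option String) (out : Int) : Prop := out = wagdalena_alt seq
instance (seq : Option String) (out : Int) : Decidable (Spec_wagdalena seq out) := by unfold Spec_wagdalena; infer_instance

-- ===== CLAIM (what is proved, stated in full; the proofs are below) =====
def Claim_equal_wagdalena : Prop := ∀ (seq : Option String), Dom_wagdalena seq → Pre_wagdalena seq → Spec_wagdalena seq (wagdalena seq)

-- ===== LEMMAS AND PROOFS =====

-- the per-residue charge, as B sees it
def chargeOf (c : Char) : Int :=
  (if c = 'K' then 1 else 0) + (if c = 'H' then 1 else 0) + (if c = 'R' then 1 else 0)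
  - (if c = 'E' then 1 else 0) - (if c = 'D' then 1 else 0)

theorem charge_eq (c : Char) :
    (if pvDico.contains c then (pvDico.get? c).getD 0 else 0) = chargeOf c := by
  by_cases hA : c = 'A'
  · subst hA; decide
  by_cases hG : c = 'G'
  · subst hG; decide
  by_cases hV : c = 'V'
  · subst hV; decide
  by_cases hL : c = 'L'
  · subst hL; decide
  by_cases hM : c = 'M'
  · subst hM; decide
  by_cases hI : c = 'I'
  · subst hI; decide
  by_cases hS : c = 'S'
  · subst hS; decide
  by_cases hT : c = 'T'
  · subst hT; decide
  by_cases hC : c = 'C'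
  · subst hC; decide
  by_cases hP : c = 'P'
  · subst hP; decide
  by_cases hQ : c = 'Q'
  · subst hQ; decide
  by_cases hF : c = 'F'
  · subst hF; decide
  by_cases hY : c = 'Y'
  · subst hY; decide
  by_cases hW : c = 'W'
  · subst hW; decide
  by_cases hN : c = 'N'
  · subst hN; decide
  by_cases hK : c = 'K'
  · subst hK; decide
  by_cases hH : c = 'H'
  · subst hH; decide
  by_cases hR : c = 'R'
  · subst hR; decide
  by_cases hE : c = 'E'
  · subst hE; decide
  by_cases hD : c = 'D'
  · subst hD; decide
  have hcon : pvDico.contains c = false := by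
    simp [pvDico, PySem.Dict.contains_mk]
    simp_all [eq_comm]
  simp [hcon, chargeOf, hK, hH, hR, hE, hD]

theorem fold_eq (l : List Char) : ∀ r : Int,
    l.foldl (fun res aa =>
        if pvDico.contains aa then res + (pvDico.get? aa).getD 0 else res) r
    = r + ((l.count 'K' : Int) + l.count 'H' + l.count 'R'
            - l.count 'E' - l.count 'D') := by
  induction l with
  | nil => intro r; simp
  | cons hd t ih =>
    intro r
    rw [List.foldl_cons, ih]
    have hstep : (if pvDico.contains hd then r + (pvDico.get? hd).getD 0 else r)
        = r + chargeOf hd := by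
      rw [← charge_eq hd]; split <;> simp
    rw [hstep]
    simp only [chargeOf, List.count_cons]
    by_cases h1 : hd = 'K' <;> by_cases h2 : hd = 'H' <;> by_cases h3 : hd = 'R' <;>
      by_cases h4 : hd = 'E' <;> by_cases h5 : hd = 'D' <;>
      simp_all <;> omega

theorem go_singleton (c : Char) (l : List Char) : ∀ (fuel acc : Nat), l.length ≤ fuel →
    PySem.Chars.count.go [c] fuel l acc = acc + l.count c := by
  induction l with
  | nil => intro fuel acc h; cases fuel <;> simp [PySem.Chars.count.go]
  | cons h t ih =>
    intro fuel acc hf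
    cases fuel with
    | zero => simp at hf
    | succ n =>
      rw [PySem.Chars.count.go]
      simp only [List.length_cons] at hf
      by_cases hc : c = h
      · subst hc
        simp [List.isPrefixOf, ih n (acc + 1) (by omega)]
        omega
      · simp [List.isPrefixOf, hc, ih n acc (by omega), Ne.symm hc]

theorem count_singleton (s : List Char) (c : Char) : PySem.Chars.count s [c] = s.count c := by
  have := go_singleton c s s.length 0 (Nat.le_refl _)
  simp [PySem.Chars.count, this]

-- ===== VERDICT (by name: the statement is the Claim_ definition above) =====
theorem wagdalena_spec : Claim_equal_wagdalena := by
  intro seq _ hpre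
  unfold Spec_wagdalena wagdalena wagdalena_alt
  match seq with
  | none => exact absurd rfl hpre
  | some s =>
    simp only [PySem.Str.count_eq]
    have hK : ("K" : String).toList = ['K'] := rfl
    have hH : ("H" : String).toList = ['H'] := rfl
    have hR : ("R" : String).toList = ['R'] := rfl
    have hE : ("E" : String).toList = ['E'] := rfl
    have hD : ("D" : String).toList = ['D'] := rfl
    rw [hK, hH, hR, hE, hD, count_singleton, count_singleton, count_singleton,
        count_singleton, count_singleton, fold_eq]
    ring
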